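-- pv_equiv track=rewrite | github.com/DivergerThinking/codeas | src/codeas/ui/pages/6_🔨_Prompt-Builder.py | extract_name_version
-- ===== SOURCE A (Python) =====
-- def extract_name_version(existing_names):
--     # names can be like {name} or {name} v.1 or {name} v.2 etc.
--     name_version_map = {}
--     for full_name in existing_names:
--         if " v." in full_name:
--             name, version = full_name.rsplit(" v.", 1)
--             version = int(version)
--         else:
--             name = full_name
--             version = 1
--
--         if name in name_version_map:
--             name_version_map[name] = max(name_version_map[name], version)
--         else:
--             name_version_map[name] = version
--     return name_version_map
-- ===== SOURCE B (Python) =====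
-- def _parse(full_name):
--     if " v." in full_name:
--         base, ver = full_name.rsplit(" v.", 1)
--         return base, int(ver)
--     return full_name, 1
--
--
-- def extract_name_version(existing_names):
--     # parse everything first (raising int()'s ValueError in the same order),
--     # then, for each distinct base name in first-occurrence order, compute its
--     # max version by an independent scan over the parsed pairs: no accumulator
--     # dict, no running max.
--     pairs = [_parse(n) for n in existing_names]
--     bases = list(dict.fromkeys(base for base, _ in pairs))
--     return {b: max(v for base, v in pairs if base == b) for b in bases}
-- ===== Notes on version B (the rewrite author's own statement) =====
-- stated objective: alternative
-- what changed: A keeps an accumulator dict with a running max updated inline in one pass; B has no accumulator: it parses all names, dedupes the base names in first-occurrence order (dict.fromkeys), and computes each base's max by an independent scan over the parsed pairs (nested scans instead of a single-pass dict fold).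
import Mathlib
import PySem

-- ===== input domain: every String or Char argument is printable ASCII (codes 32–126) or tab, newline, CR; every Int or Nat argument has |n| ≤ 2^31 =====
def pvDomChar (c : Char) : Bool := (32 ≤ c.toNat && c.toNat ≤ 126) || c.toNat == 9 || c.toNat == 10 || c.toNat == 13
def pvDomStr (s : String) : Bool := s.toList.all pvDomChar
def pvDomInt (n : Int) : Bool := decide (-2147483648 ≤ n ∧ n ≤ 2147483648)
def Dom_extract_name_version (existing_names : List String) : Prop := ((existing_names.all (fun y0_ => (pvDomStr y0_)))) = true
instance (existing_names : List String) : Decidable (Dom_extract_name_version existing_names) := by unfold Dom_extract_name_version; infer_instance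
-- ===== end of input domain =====

-- B drops A's accumulator dict entirely: it parses everything, dedupes the base names in
-- first-occurrence order, and computes each max by an independent scan over the parsed pairs.

-- ===== PORT A =====
-- A: one loop, dict name -> running max version; int(version) may raise ValueError (threaded as Option).
def extract_name_version (existing_names : List String) : List (String × Int) :=
  match existing_names.foldl (fun (acc : Option (PySem.Dict String Int)) full_name =>
    match acc with
    | none => none
    | some d =>
      if PySem.Str.isIn " v." full_name then
        -- name, version = full_name.rsplit(" v.", 1); version = int(version)
        let cs := full_name.toList
        let i := (PySem.Chars.rfind cs (" v.".toList)).toNat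
        let name := String.mk (cs.take i)
        match PySem.Int.ofChars? (cs.drop (i + 3)) with
        | none => none  -- int() raises ValueError (excluded by Pre_)
        | some version =>
          if d.contains name then some (d.insert name (max (d.getD name 0) version))
          else some (d.insert name version)
      else
        let name := full_name
        let version : Int := 1
        if d.contains name then some (d.insert name (max (d.getD name 0) version))
        else some (d.insert name version)) (some PySem.Dict.empty) with
  | none => []  -- unreachable under Pre_: the Python raises ValueError
  | some d => d.items

-- ===== PORT B =====
-- Source B helper _parse: (base, int(ver)) or (full_name, 1); none = int() ValueError
def pvParse (full_name : String) : String × Option Int :=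
  if PySem.Str.isIn " v." full_name then
    let cs := full_name.toList
    let i := (PySem.Chars.rfind cs (" v.".toList)).toNat
    (String.mk (cs.take i), PySem.Int.ofChars? (cs.drop (i + 3)))
  else (full_name, some 1)

-- Python's built-in max on a nonempty list of ints (the per-base scans are nonempty)
def pvMax : List Int → Int
  | [] => 0
  | v :: vs => vs.foldl max v

def extract_name_version_alt (existing_names : List String) : List (String × Int) :=
  let pairs0 := existing_names.map pvParse
  if pairs0.all (fun p => p.2.isSome) then
    let pairs := pairs0.map (fun p => (p.1, p.2.getD 0))
    -- bases = list(dict.fromkeys(...)): first occurrences, in order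
    let bases := PySem.List.dedup (pairs.map (fun p => p.1))
    bases.map (fun b => (b, pvMax ((pairs.filter (fun p => p.1 == b)).map (fun p => p.2))))
  else []  -- unreachable under Pre_: the Python raises ValueError

-- ===== PRECONDITION & SPEC =====
-- Pre_ excludes exactly the inputs where Python's int() raises ValueError on the text after the last " v.".
def Pre_extract_name_version (existing_names : List String) : Prop :=
  ∀ s ∈ existing_names, PySem.Str.isIn " v." s = true →
    (PySem.Int.ofChars? (s.toList.drop ((PySem.Chars.rfind s.toList (" v.".toList)).toNat + 3))).isSome = true
instance (existing_names : List String) : Decidable (Pre_extract_name_version existing_names) := by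
  unfold Pre_extract_name_version; infer_instance

def pvWitness_extract_name_version : List String := ["tool", "tool v.2", "x v.-3", "tool v.5"]

def Spec_extract_name_version (existing_names : List String) (out : List (String × Int)) : Prop := out = extract_name_version_alt existing_names
instance (existing_names : List String) (out : List (String × Int)) : Decidable (Spec_extract_name_version existing_names out) := by unfold Spec_extract_name_version; infer_instance

-- ===== CLAIM (what is proved, stated in full; the proofs are below) =====
def Claim_equal_extract_name_version : Prop := ∀ (existing_names : List String), Dom_extract_name_version existing_names → Pre_extract_name_version existing_names → Spec_extract_name_version existing_names (extract_name_version existing_names)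

-- ===== LEMMAS AND PROOFS =====

-- the parsed (base, version) pairs, once Pre_ guarantees every parse succeeds
def pvPs (existing_names : List String) : List (String × Int) :=
  existing_names.map (fun s => ((pvParse s).1, (pvParse s).2.getD 0))

def pvStepA (d : PySem.Dict String Int) (p : String × Int) : PySem.Dict String Int :=
  if d.contains p.1 then d.insert p.1 (max (d.getD p.1 0) p.2) else d.insert p.1 p.2

theorem pvStepA_eq : pvStepA = fun d p => d.insert p.1 (if d.contains p.1 then max (d.getD p.1 0) p.2 else p.2) := by
  funext d p; unfold pvStepA; split_ifs <;> rfl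

-- A's Option-threaded fold computes the plain fold over the parsed pairs
theorem pvFoldA_eq (l : List String) (h : ∀ s ∈ l, PySem.Str.isIn " v." s = true →
    (PySem.Int.ofChars? (s.toList.drop ((PySem.Chars.rfind s.toList (" v.".toList)).toNat + 3))).isSome = true)
    (d : PySem.Dict String Int) :
    l.foldl (fun (acc : Option (PySem.Dict String Int)) full_name =>
      match acc with
      | none => none
      | some d =>
        if PySem.Str.isIn " v." full_name then
          let cs := full_name.toList
          let i := (PySem.Chars.rfind cs (" v.".toList)).toNat
          let name := String.mk (cs.take i)
          match PySem.Int.ofChars? (cs.drop (i + 3)) with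
          | none => none
          | some version =>
            if d.contains name then some (d.insert name (max (d.getD name 0) version))
            else some (d.insert name version)
        else
          let name := full_name
          let version : Int := 1
          if d.contains name then some (d.insert name (max (d.getD name 0) version))
          else some (d.insert name version)) (some d)
    = some ((pvPs l).foldl pvStepA d) := by
  induction l generalizing d with
  | nil => rfl
  | cons s rest ih =>
    have hs := h s (by simp)
    simp only [List.foldl_cons, pvPs, List.map_cons]
    by_cases hin : PySem.Str.isIn " v." s = true
    · rcases Option.isSome_iff_exists.mp (hs hin) with ⟨v, hv⟩
      simp only [hin, if_true, hv]
      rw [← apply_ite Option.some, ih (fun t ht => h t (by simp [ht]))]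
      simp only [pvPs]
      congr 1
      simp only [pvParse, pvStepA, hin, if_true, hv, Option.getD_some]
    · simp only [eq_false_of_ne_true hin, Bool.false_eq_true, if_false]
      rw [← apply_ite Option.some, ih (fun t ht => h t (by simp [ht]))]
      simp only [pvPs]
      congr 1
      simp only [pvParse, pvStepA, eq_false_of_ne_true hin, Bool.false_eq_true, if_false,
        Option.getD_some]

-- characterisation of A's fold: the value at k is the running max over the versions filed under k
theorem pvFoldA_getD (l : List (String × Int)) (d : PySem.Dict String Int) (k : String) :
    (l.foldl pvStepA d).getD k 0 =
      match (l.filter (fun p => p.1 == k)).map (fun p => p.2) with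
      | [] => d.getD k 0
      | v :: vs => vs.foldl max (if d.contains k then max (d.getD k 0) v else v) := by
  induction l generalizing d with
  | nil => rfl
  | cons p rest ih =>
    by_cases hk : p.1 = k
    · simp only [List.foldl_cons, List.filter_cons, hk, BEq.rfl, if_true, List.map_cons]
      rw [ih]
      by_cases hc : d.contains k
      · simp only [pvStepA, hk, hc, if_true]
        cases hrest : (rest.filter (fun p => p.1 == k)).map (fun p => p.2) with
        | nil => simp [PySem.Dict.getD_insert_self]
        | cons w ws =>
          simp [PySem.Dict.contains_insert_self, PySem.Dict.getD_insert_self, List.foldl_cons]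
      · simp only [pvStepA, hk, hc, if_false, Bool.false_eq_true]
        cases hrest : (rest.filter (fun p => p.1 == k)).map (fun p => p.2) with
        | nil => simp [PySem.Dict.getD_insert_self, hc]
        | cons w ws =>
          simp [PySem.Dict.contains_insert_self, PySem.Dict.getD_insert_self, hc, List.foldl_cons]
    · have hbeq : (p.1 == k) = false := by simp [hk]
      simp only [List.foldl_cons, List.filter_cons, hbeq, Bool.false_eq_true, if_false]
      rw [ih]
      have hgd : (pvStepA d p).getD k 0 = d.getD k 0 := by
        rw [pvStepA_eq]
        simp only []
        rw [PySem.Dict.getD_insert]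
        simp [Ne.symm hk]
      have hcd : (pvStepA d p).contains k = d.contains k := by
        rw [pvStepA_eq]
        simp only []
        rw [PySem.Dict.contains_insert]
        simp [Ne.symm hk]
      rw [hgd, hcd]

-- full assembly
theorem pv_main (existing_names : List String)
    (hpre : Pre_extract_name_version existing_names) :
    extract_name_version existing_names = extract_name_version_alt existing_names := by
  have hall : (existing_names.map pvParse).all (fun p => p.2.isSome) = true := by
    rw [List.all_eq_true]
    intro p hp
    rcases List.mem_map.mp hp with ⟨s, hs, rfl⟩
    by_cases hin : PySem.Str.isIn " v." s = true
    · simp only [pvParse, hin, if_true]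
      exact hpre s hs hin
    · simp only [pvParse, eq_false_of_ne_true hin, Bool.false_eq_true, if_false, Option.isSome_some]
  -- A side
  unfold extract_name_version
  rw [pvFoldA_eq existing_names hpre PySem.Dict.empty]
  -- B side
  unfold extract_name_version_alt
  simp only [hall, if_true]
  have hpairs : (existing_names.map pvParse).map (fun p => (p.1, p.2.getD 0)) = pvPs existing_names := by
    unfold pvPs; rw [List.map_map]; rfl
  rw [hpairs]
  set ps := pvPs existing_names with hps
  set dA := ps.foldl pvStepA PySem.Dict.empty with hdA
  have hkeysA : dA.keys = PySem.Set.update (PySem.Dict.empty : PySem.Dict String Int).keys (ps.map (fun p => p.1)) := by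
    rw [hdA, pvStepA_eq]
    exact PySem.Dict.keys_foldl_insert_key ps (fun p => p.1)
      (fun d p => if d.contains p.1 then max (d.getD p.1 0) p.2 else p.2) PySem.Dict.empty
  have hndA : dA.keys.Nodup := by
    rw [hdA, pvStepA_eq]
    exact PySem.Dict.nodup_keys_foldl_insert_key ps (fun p => p.1)
      (fun d p => if d.contains p.1 then max (d.getD p.1 0) p.2 else p.2) PySem.Dict.empty
      PySem.Dict.nodup_keys_empty
  rw [PySem.Dict.items_eq_map_keys dA hndA 0, hkeysA]
  have hbase : PySem.Set.update (PySem.Dict.empty : PySem.Dict String Int).keys (ps.map (fun p => p.1))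
      = PySem.List.dedup (ps.map (fun p => p.1)) := by
    simp [PySem.Set.update, PySem.Set.ofList_eq_foldl, PySem.Dict.keys_empty]
  rw [hbase]
  apply List.map_congr_left
  intro k hk
  have hmem : k ∈ ps.map (fun p => p.1) := by
    simpa [PySem.List.mem_dedup] using hk
  have hfilter : (ps.filter (fun p => p.1 == k)).map (fun p => p.2) ≠ [] := by
    rcases List.mem_map.mp hmem with ⟨p, hp, hpk⟩
    intro hnil
    simp only [List.map_eq_nil_iff, List.filter_eq_nil_iff] at hnil
    exact absurd (hnil p hp) (by simp [hpk])
  rw [pvFoldA_getD ps PySem.Dict.empty k]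
  cases hflt : (ps.filter (fun p => p.1 == k)).map (fun p => p.2) with
  | nil => exact absurd hflt hfilter
  | cons v vs =>
    simp [pvMax, PySem.Dict.contains_empty]

-- ===== VERDICT (by name: the statement is the Claim_ definition above) =====
theorem extract_name_version_spec : Claim_equal_extract_name_version := by
  intro xs _ hpre
  unfold Spec_extract_name_version
  exact pv_main xs hpre
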